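-- pv_equiv track=rewrite | github.com/telldus/tellstick-server | rf433/src/rf433/ProtocolRisingSun.py | codeSwitchTuple
-- ===== SOURCE A (Python) =====
-- def codeSwitchTuple(intToConvert):
-- 	strReturn = ''
-- 	for i in range(4):
-- 		if i == intToConvert:
-- 			strReturn = strReturn + '.e.e'
-- 		else:
-- 			strReturn = strReturn + 'e..e'
-- 	return strReturn
-- ===== SOURCE B (Python) =====
-- def codeSwitchTuple(intToConvert):
-- 	base = 'e..e' * 4
-- 	if 0 <= intToConvert < 4:
-- 		k = 4 * intToConvert
-- 		return base[:k] + '.e.e' + base[k + 4:]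
-- 	return base
-- ===== Notes on version B (the rewrite author's own statement) =====
-- stated objective: simpler
-- what changed: Replaces the four-iteration accumulate-and-branch loop with a closed form: a uniform base string plus one slice-splice at the matching position (or the base unchanged when the index is out of range).
import Mathlib
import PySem

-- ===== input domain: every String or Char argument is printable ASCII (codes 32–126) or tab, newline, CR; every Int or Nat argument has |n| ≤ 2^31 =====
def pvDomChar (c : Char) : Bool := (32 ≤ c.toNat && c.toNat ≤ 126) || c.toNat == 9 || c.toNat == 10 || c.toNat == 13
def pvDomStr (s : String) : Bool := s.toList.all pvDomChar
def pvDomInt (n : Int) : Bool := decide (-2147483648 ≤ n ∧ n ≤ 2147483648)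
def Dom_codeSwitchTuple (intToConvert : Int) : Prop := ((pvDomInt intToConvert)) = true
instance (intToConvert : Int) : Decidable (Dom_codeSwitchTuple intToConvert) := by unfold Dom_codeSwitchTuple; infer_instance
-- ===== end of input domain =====

-- ===== PORT A =====
-- One-line: B replaces the 4-step accumulate loop with a uniform base string plus one slice-splice.
def codeSwitchTuple (intToConvert : Int) : String :=
  (PySem.List.pyRange 0 4 1).foldl
    (fun strReturn i => if i == intToConvert then strReturn ++ ".e.e" else strReturn ++ "e..e") ""


-- ===== PORT B =====
def codeSwitchTuple_alt (intToConvert : Int) : String :=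
  let base : String := String.ofList (PySem.List.pyRepeat "e..e".toList 4)  -- 'e..e' * 4
  if 0 ≤ intToConvert ∧ intToConvert < 4 then
    PySem.Str.slice base none (some (4 * intToConvert)) ++ ".e.e" ++
      PySem.Str.slice base (some (4 * intToConvert + 4)) none
  else base


-- ===== PRECONDITION & SPEC =====
def Spec_codeSwitchTuple (intToConvert : Int) (out : String) : Prop := out = codeSwitchTuple_alt intToConvert
instance (intToConvert : Int) (out : String) : Decidable (Spec_codeSwitchTuple intToConvert out) := by unfold Spec_codeSwitchTuple; infer_instance

-- ===== CLAIM (what is proved, stated in full; the proofs are below) =====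
def Claim_equal_codeSwitchTuple : Prop := ∀ (intToConvert : Int), Dom_codeSwitchTuple intToConvert → Spec_codeSwitchTuple intToConvert (codeSwitchTuple intToConvert)

-- ===== LEMMAS AND PROOFS =====

-- ===== VERDICT (by name: the statement is the Claim_ definition above) =====
theorem codeSwitchTuple_spec : Claim_equal_codeSwitchTuple := by
  intro i _
  unfold Spec_codeSwitchTuple
  by_cases h0 : i = 0
  · subst h0; decide
  by_cases h1 : i = 1
  · subst h1; decide
  by_cases h2 : i = 2
  · subst h2; decide
  by_cases h3 : i = 3
  · subst h3; decide
  have hn : ¬ (0 ≤ i ∧ i < 4) := by omega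
  have e0 : ((0 : Int) == i) = false := by simp; omega
  have e1 : ((1 : Int) == i) = false := by simp; omega
  have e2 : ((2 : Int) == i) = false := by simp; omega
  have e3 : ((3 : Int) == i) = false := by simp; omega
  unfold codeSwitchTuple codeSwitchTuple_alt
  rw [show PySem.List.pyRange 0 4 1 = [0, 1, 2, 3] from by decide]
  simp [List.foldl, e0, e1, e2, e3, hn]
  decide
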